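-- pv_equiv track=rewrite | github.com/AWAlexWeber/python-practice | Companies/Amazon/UserSimilar.py | similarUser
-- ===== SOURCE A (Python) =====
-- from typing import List
-- from collections import defaultdict
--
-- def similarUser(users: List[str], products: List[str], data: List[tuple], target: str):
--     # First we need to take the dataset and convert it into a hash of sets
--     userProjection = defaultdict(lambda: set())
--     productProjection = defaultdict(lambda: set())
--
--     # O(n) where n is the number of datapoints in our dataset
--     for p in data:
--         userProjection[p[0]].add(p[1])
--         productProjection[p[1]].add(p[0])
--
--     # Now that we've constructed our sets, we're going to iterate over all of the project keys in our target set. O(n * m)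
--     userCount = defaultdict(lambda: 0)
--     maxUserCount, maxUser = 0, None
--     for product in userProjection[target]:
--         for user in productProjection[product]:
--             if user == target:
--                 continue
--             userCount[user] += 1
--
--             # Extra bit after that or handles alphabetical ties
--             if (userCount[user] > maxUserCount) or (userCount[user] == maxUserCount and user < maxUser):
--                 maxUserCount = userCount[user]
--                 maxUser = user
--
--     return maxUser
-- ===== SOURCE B (Python) =====
-- def similarUser(users, products, data, target):
--     # user -> set of products, built straight from data (no product->users inverted index)
--     proj = {}
--     for u, p in data:
--         proj.setdefault(u, set()).add(p)
--     t = proj.get(target, set())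
--     best = None  # (name, overlap)
--     for u, ps in proj.items():
--         if u == target:
--             continue
--         c = len(ps & t)
--         if c > 0 and (best is None or c > best[1] or (c == best[1] and u < best[0])):
--             best = (u, c)
--     return best[0] if best is not None else None
-- ===== Notes on version B (the rewrite author's own statement) =====
-- stated objective: simpler
-- what changed: B builds only the user->products map and picks the best user by directly computing each candidate's set-intersection size with the target's product set, instead of A's product->users inverted index plus online per-co-occurrence counter updates.
import Mathlib
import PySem

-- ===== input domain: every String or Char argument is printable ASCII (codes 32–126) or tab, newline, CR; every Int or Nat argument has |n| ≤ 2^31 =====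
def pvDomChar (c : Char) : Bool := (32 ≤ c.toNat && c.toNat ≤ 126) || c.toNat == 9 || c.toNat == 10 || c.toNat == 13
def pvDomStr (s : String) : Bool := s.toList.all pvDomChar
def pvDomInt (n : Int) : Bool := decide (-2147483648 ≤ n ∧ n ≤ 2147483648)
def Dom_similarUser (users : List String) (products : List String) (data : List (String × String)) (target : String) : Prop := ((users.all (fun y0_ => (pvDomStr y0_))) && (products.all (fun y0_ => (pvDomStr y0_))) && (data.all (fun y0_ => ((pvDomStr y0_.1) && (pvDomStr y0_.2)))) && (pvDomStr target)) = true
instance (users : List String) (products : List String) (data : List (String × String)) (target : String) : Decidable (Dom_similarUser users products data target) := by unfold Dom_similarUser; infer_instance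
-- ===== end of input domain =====

-- B replaces A's product->users inverted index and online co-occurrence counting by a single
-- user->products map and a direct per-candidate set-intersection size (objective: simpler).
-- Both Pythons only read their arguments; A's result does not depend on set iteration order
-- (proved here via an order-insensitive characterisation of its running maximum).

-- ===== PORT A =====
-- the two defaultdict(set) projections built from data
def pvA_build (data : List (String × String)) :
    PySem.Dict String (PySem.Set String) × PySem.Dict String (PySem.Set String) :=
  data.foldl
    (fun s p =>
      (s.1.modify p.1 PySem.Set.empty (fun t => PySem.Set.add t p.2),
       s.2.modify p.2 PySem.Set.empty (fun t => PySem.Set.add t p.1)))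
    (PySem.Dict.empty, PySem.Dict.empty)

-- body of A's inner loop: state = (userCount, maxUserCount, maxUser)
def pvA_step (target : String)
    (st : PySem.Dict String Int × Int × Option String) (user : String) :
    PySem.Dict String Int × Int × Option String :=
  if user == target then st
  else
    let userCount := st.1.modify user 0 (· + 1)
    if userCount.getD user 0 > st.2.1 ||
        (userCount.getD user 0 == st.2.1 &&
          (match st.2.2 with
           | some m => decide (user < m)
           | none => false)) then
      (userCount, userCount.getD user 0, some user)
    else
      (userCount, st.2.1, st.2.2)

def similarUser (users : List String) (products : List String) (data : List (String × String)) (target : String) : Option String :=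
  let proj := pvA_build data
  let st :=
    (proj.1.getD target PySem.Set.empty).foldl
      (fun st product => (proj.2.getD product PySem.Set.empty).foldl (pvA_step target) st)
      (PySem.Dict.empty, 0, none)
  st.2.2

-- ===== PORT B =====
-- the single user -> set-of-products map
def pvB_build (data : List (String × String)) : PySem.Dict String (PySem.Set String) :=
  data.foldl (fun d p => d.modify p.1 PySem.Set.empty (fun s => PySem.Set.add s p.2))
    PySem.Dict.empty

-- body of B's loop: best = None | (name, overlap)
def pvB_step (target : String) (t : PySem.Set String)
    (best : Option (String × Int)) (up : String × PySem.Set String) : Option (String × Int) :=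
  if up.1 == target then best
  else
    let c := PySem.Set.len (PySem.Set.inter up.2 t)
    if c > 0 &&
        (match best with
         | none => true
         | some b => c > b.2 || (c == b.2 && decide (up.1 < b.1))) then
      some (up.1, c)
    else best

def similarUser_alt (users : List String) (products : List String) (data : List (String × String)) (target : String) : Option String :=
  let proj := pvB_build data
  let t := proj.getD target PySem.Set.empty
  let best := proj.items.foldl (pvB_step target t) none
  best.map (·.1)

-- ===== PRECONDITION & SPEC =====
def Spec_similarUser (users : List String) (products : List String) (data : List (String × String)) (target : String) (out : Option String) : Prop := out = similarUser_alt users products data target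
instance (users : List String) (products : List String) (data : List (String × String)) (target : String) (out : Option String) : Decidable (Spec_similarUser users products data target out) := by unfold Spec_similarUser; infer_instance

-- ===== CLAIM (what is proved, stated in full; the proofs are below) =====
def Claim_equal_similarUser : Prop := ∀ (users : List String) (products : List String) (data : List (String × String)) (target : String), Dom_similarUser users products data target → Spec_similarUser users products data target (similarUser users products data target)

-- ===== LEMMAS AND PROOFS =====

-- proof-side abbreviations -------------------------------------------------
-- the product -> users projection (second component of A's build)
def pvPP (data : List (String × String)) : PySem.Dict String (PySem.Set String) :=
  data.foldl (fun d p => d.modify p.2 PySem.Set.empty (fun s => PySem.Set.add s p.1))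
    PySem.Dict.empty

-- target's product set
def pvT (data : List (String × String)) (target : String) : PySem.Set String :=
  (pvB_build data).getD target PySem.Set.empty

-- the (filtered) sequence of users A's double loop processes
def pvPF (data : List (String × String)) (target : String) : List String :=
  ((pvT data target).flatMap (fun p => (pvPP data).getD p PySem.Set.empty)).filter
    (fun u => !(u == target))

-- B's overlap value of a candidate user
def pvC (data : List (String × String)) (target : String) (u : String) : Int :=
  PySem.Set.len (PySem.Set.inter ((pvB_build data).getD u PySem.Set.empty) (pvT data target))

-- order-insensitive description of A's running maximum over a processed list P
def pvBestProp (P : List String) (mc : Int) (mu : Option String) : Prop :=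
  match mu with
  | none => mc = 0 ∧ P = []
  | some b => b ∈ P ∧ mc = (P.count b : Int) ∧
      (∀ w ∈ P, P.count w ≤ P.count b) ∧
      (∀ w ∈ P, P.count w = P.count b → ¬ w < b)

def pvInvA (target : String) (P : List String)
    (st : PySem.Dict String Int × Int × Option String) : Prop :=
  (∀ u, st.1.getD u 0 = (P.count u : Int)) ∧ pvBestProp P st.2.1 st.2.2

lemma pv_count_app (P : List String) (a v : String) :
    (P ++ [a]).count v = P.count v + if v = a then 1 else 0 := by
  simp [List.count_append, List.count_singleton']
  split_ifs with h1 h2 h2 <;> simp_all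

lemma pvA_step_inv (target : String) (P : List String) st (u : String)
    (h : pvInvA target P st) :
    pvInvA target (if u = target then P else P ++ [u]) (pvA_step target st u) := by
  obtain ⟨d, mc, mu⟩ := st
  obtain ⟨hcnt, hbest⟩ := h
  unfold pvA_step
  by_cases hu : u = target
  · simp only [hu, beq_self_eq_true, if_true]
    exact ⟨hcnt, hbest⟩
  · simp only [beq_iff_eq, hu, if_false]
    have hc : (d.modify u 0 (· + 1)).getD u 0 = (P.count u : Int) + 1 := by
      rw [PySem.Dict.getD_modify_self]
      rw [show d.getD u 0 = (P.count u : Int) from hcnt u]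
    have hcnt' : ∀ v, (d.modify u 0 (· + 1)).getD v 0 = (((P ++ [u]).count v : Nat) : Int) := by
      intro v
      rw [PySem.Dict.getD_modify, pv_count_app]
      by_cases hv : v = u
      · subst hv
        rw [if_pos rfl, show d.getD v 0 = (P.count v : Int) from hcnt v]
        norm_num
      · simp only [hv, if_false]
        rw [show d.getD v 0 = (P.count v : Int) from hcnt v]; push_cast; ring
    have hcu : (P ++ [u]).count u = P.count u + 1 := by rw [pv_count_app]; simp
    have hcv : ∀ v, v ≠ u → (P ++ [u]).count v = P.count v := by
      intro v hv; rw [pv_count_app]; simp [hv]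
    refine ⟨?_, ?_⟩
    · split_ifs <;> exact hcnt'
    · rw [hc]
      rcases mu with _ | b
    -- no best yet: P = [], mc = 0
      · simp only [pvBestProp] at hbest
        obtain ⟨hmc0, hP0⟩ := hbest
        subst hP0; subst hmc0
        simp only [List.count_nil, Nat.cast_zero, zero_add]
        norm_num
        simp only [pvBestProp]
        refine ⟨by simp, by simp, ?_, ?_⟩
        · intro v hv; simp at hv; subst hv; exact le_refl _
        · intro v hv _; simp at hv; subst hv; exact lt_irrefl _
      · simp only [pvBestProp] at hbest
        obtain ⟨hbP, hmcb, hmax, hmin⟩ := hbest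
        split_ifs with hcond
        · -- updated: new best is u
          simp only [Bool.or_eq_true, decide_eq_true_eq, Bool.and_eq_true, beq_iff_eq] at hcond
          simp only [pvBestProp]
          refine ⟨by simp, by rw [hcu]; push_cast; ring, ?_, ?_⟩
          · intro v hv
            by_cases hvu : v = u
            · subst hvu; exact le_refl _
            · rw [hcv v hvu, hcu]
              have hvP : v ∈ P := by
                rcases List.mem_append.mp hv with h | h
                · exact h
                · simp at h; exact absurd h hvu
              have h1 : P.count v ≤ P.count b := hmax v hvP
              rcases hcond with hgt | ⟨heq, _⟩
              · have : (P.count b : Int) < (P.count u : Int) + 1 := by rw [← hmcb]; exact hgt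
                omega
              · have : (P.count u : Int) + 1 = (P.count b : Int) := by rw [← hmcb]; exact heq
                omega
          · intro v hv hveq
            by_cases hvu : v = u
            · subst hvu; exact lt_irrefl _
            · rw [hcv v hvu, hcu] at hveq
              have hvP : v ∈ P := by
                rcases List.mem_append.mp hv with h | h
                · exact h
                · simp at h; exact absurd h hvu
              have h1 : P.count v ≤ P.count b := hmax v hvP
              rcases hcond with hgt | ⟨heq, hub⟩
              · have : (P.count b : Int) < (P.count u : Int) + 1 := by rw [← hmcb]; exact hgt
                omega
              · have heq' : P.count u + 1 = P.count b := by
                  have : (P.count u : Int) + 1 = (P.count b : Int) := by rw [← hmcb]; exact heq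
                  omega
                have hvb : P.count v = P.count b := by omega
                have hnvb : ¬ v < b := hmin v hvP hvb
                intro hvu'
                exact hnvb (lt_trans hvu' hub)
        · -- not updated: best stays b
          simp only [Bool.or_eq_true, decide_eq_true_eq, Bool.and_eq_true, beq_iff_eq,
            not_or, not_and] at hcond
          obtain ⟨hle, htie⟩ := hcond
          have hbu : b ≠ u := by
            intro e
            subst e
            rw [hmcb] at hle
            omega
          simp only [pvBestProp]
          refine ⟨List.mem_append.mpr (Or.inl hbP), by rw [hcv b hbu]; exact hmcb, ?_, ?_⟩
          · intro v hv
            rw [hcv b hbu]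
            by_cases hvu : v = u
            · subst hvu
              rw [hcu]
              have : (P.count v : Int) + 1 ≤ (P.count b : Int) := by rw [← hmcb]; omega
              omega
            · have hvP : v ∈ P := by
                rcases List.mem_append.mp hv with h | h
                · exact h
                · simp at h; exact absurd h hvu
              rw [hcv v hvu]
              exact hmax v hvP
          · intro v hv hveq
            rw [hcv b hbu] at hveq
            by_cases hvu : v = u
            · subst hvu
              rw [hcu] at hveq
              exact htie (by rw [hmcb]; omega)
            · have hvP : v ∈ P := by
                rcases List.mem_append.mp hv with h | h
                · exact h
                · simp at h; exact absurd h hvu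
              rw [hcv v hvu] at hveq
              exact hmin v hvP hveq

lemma pvA_fold_inv (target : String) :
    ∀ (L : List String) (P : List String) st, pvInvA target P st →
      pvInvA target (P ++ L.filter (fun u => !(u == target)))
        (L.foldl (pvA_step target) st) := by
  intro L
  induction L with
  | nil => intro P st h; simpa using h
  | cons u L ih =>
    intro P st h
    have hstep := pvA_step_inv target P st u h
    by_cases hu : u = target
    · subst hu
      rw [if_pos rfl] at hstep
      have hf : List.filter (fun v => !(v == u)) (u :: L) = L.filter (fun v => !(v == u)) := by
        simp
      simp only [List.foldl_cons]
      rw [hf]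
      exact ih P _ hstep
    · rw [if_neg hu] at hstep
      have hf : List.filter (fun v => !(v == target)) (u :: L) =
          u :: L.filter (fun v => !(v == target)) := by
        simp [hu]
      rw [hf]
      have := ih (P ++ [u]) _ hstep
      simpa [List.append_assoc] using this

lemma pv_foldl_foldl {α β γ : Type} (g : α → List β) (h : γ → β → γ) :
    ∀ (ps : List α) (st : γ),
      ps.foldl (fun st p => (g p).foldl h st) st = (ps.flatMap g).foldl h st := by
  intro ps
  induction ps with
  | nil => intro st; rfl
  | cons p ps ih => intro st; simp only [List.foldl_cons, List.flatMap_cons, List.foldl_append, ih]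

def pvInvB (target : String) (c : String → Int) (K : List String)
    (best : Option (String × Int)) : Prop :=
  match best with
  | none => ∀ u ∈ K, u ≠ target → c u ≤ 0
  | some b => b.1 ∈ K ∧ b.1 ≠ target ∧ b.2 = c b.1 ∧ 0 < b.2 ∧
      (∀ u ∈ K, u ≠ target → c u ≤ b.2) ∧
      (∀ u ∈ K, u ≠ target → c u = b.2 → ¬ u < b.1)


-- build lemmas -------------------------------------------------------------
lemma pvA_build_eq (data : List (String × String)) :
    pvA_build data = (pvB_build data, pvPP data) := by
  suffices h : ∀ (l : List (String × String)) (d1 d2 : PySem.Dict String (PySem.Set String)),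
      l.foldl (fun (s : PySem.Dict String (PySem.Set String) × PySem.Dict String (PySem.Set String)) p =>
        (s.1.modify p.1 PySem.Set.empty (fun t => PySem.Set.add t p.2),
         s.2.modify p.2 PySem.Set.empty (fun t => PySem.Set.add t p.1))) (d1, d2)
      = (l.foldl (fun d p => d.modify p.1 PySem.Set.empty (fun s => PySem.Set.add s p.2)) d1,
         l.foldl (fun d p => d.modify p.2 PySem.Set.empty (fun s => PySem.Set.add s p.1)) d2) by
    exact h data _ _
  intro l
  induction l with
  | nil => intro d1 d2; rfl
  | cons p l ih => intro d1 d2; simp only [List.foldl_cons]; exact ih _ _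

lemma pv_mem_modify_aux {α : Type} (f g : α → String) (l : List α) :
    ∀ (d : PySem.Dict String (PySem.Set String)) (u x : String),
      (x ∈ (l.foldl (fun d p => PySem.Dict.modify d (f p) PySem.Set.empty
              (fun s => PySem.Set.add s (g p))) d).getD u PySem.Set.empty
        ↔ x ∈ d.getD u PySem.Set.empty ∨ ∃ p ∈ l, f p = u ∧ g p = x) := by
  induction l with
  | nil => intro d u x; simp
  | cons p l ih =>
    intro d u x
    simp only [List.foldl_cons]
    rw [ih, PySem.Dict.getD_modify]
    by_cases hu : u = f p
    · rw [if_pos hu, PySem.Set.mem_add, hu]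
      constructor
      · rintro (⟨h | h⟩ | ⟨q, hq, h1, h2⟩)
        · exact Or.inl h
        · exact Or.inr ⟨p, List.mem_cons_self, rfl, h.symm⟩
        · exact Or.inr ⟨q, List.mem_cons_of_mem p hq, h1, h2⟩
      · rintro (h | ⟨q, hq, h1, h2⟩)
        · exact Or.inl (Or.inl h)
        · rcases List.mem_cons.mp hq with rfl | hq'
          · exact Or.inl (Or.inr h2.symm)
          · exact Or.inr ⟨q, hq', h1, h2⟩
    · rw [if_neg hu]
      constructor
      · rintro (h | ⟨q, hq, h1, h2⟩)
        · exact Or.inl h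
        · exact Or.inr ⟨q, List.mem_cons_of_mem p hq, h1, h2⟩
      · rintro (h | ⟨q, hq, h1, h2⟩)
        · exact Or.inl h
        · rcases List.mem_cons.mp hq with rfl | hq'
          · exact absurd h1.symm hu
          · exact Or.inr ⟨q, hq', h1, h2⟩

lemma pv_nodup_modify_aux {α : Type} (f g : α → String) (l : List α) :
    ∀ (d : PySem.Dict String (PySem.Set String)) (u : String),
      (∀ v, (d.getD v PySem.Set.empty).Nodup) →
      ((l.foldl (fun d p => PySem.Dict.modify d (f p) PySem.Set.empty
          (fun s => PySem.Set.add s (g p))) d).getD u PySem.Set.empty).Nodup := by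
  induction l with
  | nil => intro d u h; exact h u
  | cons p l ih =>
    intro d u h
    simp only [List.foldl_cons]
    apply ih
    intro v
    rw [PySem.Dict.getD_modify]
    split_ifs with hv
    · exact PySem.Set.nodup_add _ _ (h (f p))
    · exact h v

lemma pv_mem_build (data : List (String × String)) (u x : String) :
    x ∈ (pvB_build data).getD u PySem.Set.empty ↔ (u, x) ∈ data := by
  unfold pvB_build
  rw [pv_mem_modify_aux (fun p => p.1) (fun p => p.2) data]
  simp only [PySem.Dict.getD_empty]
  constructor
  · rintro (h | ⟨⟨a, b⟩, hq, h1, h2⟩)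
    · simp [PySem.Set.empty] at h
    · subst h1; subst h2; exact hq
  · intro h; exact Or.inr ⟨(u, x), h, rfl, rfl⟩

lemma pv_mem_pp (data : List (String × String)) (p x : String) :
    x ∈ (pvPP data).getD p PySem.Set.empty ↔ (x, p) ∈ data := by
  unfold pvPP
  rw [pv_mem_modify_aux (fun q => q.2) (fun q => q.1) data]
  simp only [PySem.Dict.getD_empty]
  constructor
  · rintro (h | ⟨⟨a, b⟩, hq, h1, h2⟩)
    · simp [PySem.Set.empty] at h
    · subst h1; subst h2; exact hq
  · intro h; exact Or.inr ⟨(x, p), h, rfl, rfl⟩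

lemma pv_nodup_build (data : List (String × String)) (u : String) :
    ((pvB_build data).getD u PySem.Set.empty).Nodup := by
  unfold pvB_build
  apply pv_nodup_modify_aux (fun p => p.1) (fun p => p.2) data
  intro v; simp [PySem.Dict.getD_empty, PySem.Set.empty]

lemma pv_nodup_pp (data : List (String × String)) (p : String) :
    ((pvPP data).getD p PySem.Set.empty).Nodup := by
  unfold pvPP
  apply pv_nodup_modify_aux (fun q => q.2) (fun q => q.1) data
  intro v; simp [PySem.Dict.getD_empty, PySem.Set.empty]

lemma pv_mem_keys (data : List (String × String)) (u : String) :
    u ∈ (pvB_build data).keys ↔ ∃ p, (u, p) ∈ data := by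
  unfold pvB_build
  rw [PySem.Dict.keys_foldl_modify_key data (fun p => p.1) PySem.Set.empty
      (fun d p => (fun s => PySem.Set.add s p.2)) PySem.Dict.empty]
  simp [PySem.Dict.keys_empty, PySem.Set.update_nil_left, PySem.Set.mem_ofList]

lemma pv_nodup_keys (data : List (String × String)) : (pvB_build data).keys.Nodup := by
  unfold pvB_build
  exact PySem.Dict.nodup_keys_foldl_modify_key data (fun p => p.1) PySem.Set.empty
      (fun d p => (fun s => PySem.Set.add s p.2)) PySem.Dict.empty
      (by simp)
lemma pvB_fold_inv (target : String) (c : String → Int) (t : PySem.Set String)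
    (pd : PySem.Dict String (PySem.Set String))
    (hc : ∀ k, PySem.Set.len (PySem.Set.inter (pd.getD k PySem.Set.empty) t) = c k) :
    ∀ (K : List String) (K₀ : List String) best, pvInvB target c K₀ best →
      pvInvB target c (K₀ ++ K)
        (K.foldl (fun best k => pvB_step target t best (k, pd.getD k PySem.Set.empty)) best) := by
  intro K
  induction K with
  | nil => intro K₀ best h; simpa using h
  | cons k K ih =>
    intro K₀ best h
    simp only [List.foldl_cons]
    have hgoal : pvInvB target c (K₀ ++ [k]) (pvB_step target t best (k, pd.getD k PySem.Set.empty)) := by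
      unfold pvB_step
      by_cases hk : k = target
      · simp only [hk, beq_self_eq_true, if_true]
        rcases best with _ | b
        · intro u hu hut
          rcases List.mem_append.mp hu with h' | h'
          · exact h u h' hut
          · rw [List.mem_singleton] at h'
            exact absurd h' hut
        · obtain ⟨h1, h2, h3, h4, h5, h6⟩ := h
          refine ⟨List.mem_append.mpr (Or.inl h1), h2, h3, h4, ?_, ?_⟩
          · intro u hu hut
            rcases List.mem_append.mp hu with h' | h'
            · exact h5 u h' hut
            · rw [List.mem_singleton] at h'
              exact absurd h' hut
          · intro u hu hut heq
            rcases List.mem_append.mp hu with h' | h'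
            · exact h6 u h' hut heq
            · rw [List.mem_singleton] at h'
              exact absurd h' hut
      · simp only [beq_iff_eq, hk, if_false]
        rw [hc k]
        rcases best with _ | b
        · split_ifs with hb
          · simp only [Bool.and_eq_true, decide_eq_true_eq, gt_iff_lt] at hb
            have hpos : 0 < c k := hb.1
            refine ⟨by simp, hk, rfl, hpos, ?_, ?_⟩
            · intro u hu hut
              rcases List.mem_append.mp hu with h' | h'
              · exact le_trans (h u h' hut) (le_of_lt hpos)
              · rw [List.mem_singleton] at h'; subst h'; exact le_refl _
            · intro u hu hut heq
              rcases List.mem_append.mp hu with h' | h'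
              · have := h u h' hut; omega
              · rw [List.mem_singleton] at h'; subst h'; exact lt_irrefl _
          · simp only [Bool.and_eq_true, decide_eq_true_eq, gt_iff_lt, not_and] at hb
            intro u hu hut
            rcases List.mem_append.mp hu with h' | h'
            · exact h u h' hut
            · rw [List.mem_singleton] at h'; subst h'
              by_contra hp
              simp at hb
              omega
        · obtain ⟨h1, h2, h3, h4, h5, h6⟩ := h
          split_ifs with hb
          · simp only [Bool.and_eq_true, Bool.or_eq_true, decide_eq_true_eq, beq_iff_eq,
              gt_iff_lt] at hb
            obtain ⟨hpos, hcase⟩ := hb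
            refine ⟨by simp, hk, rfl, hpos, ?_, ?_⟩
            · intro u hu hut
              rcases List.mem_append.mp hu with h' | h'
              · have := h5 u h' hut
                rcases hcase with h'' | ⟨h'', _⟩ <;> omega
              · rw [List.mem_singleton] at h'; subst h'; exact le_refl _
            · intro u hu hut heq
              rcases List.mem_append.mp hu with h' | h'
              · rcases hcase with h'' | ⟨h'', hlt⟩
                · have := h5 u h' hut; omega
                · have hub : ¬ u < b.1 := h6 u h' hut (by omega)
                  intro huk
                  exact hub (lt_trans huk hlt)
              · rw [List.mem_singleton] at h'; subst h'; exact lt_irrefl _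
          · simp only [Bool.and_eq_true, Bool.or_eq_true, decide_eq_true_eq, beq_iff_eq,
              gt_iff_lt, not_and, not_or] at hb
            refine ⟨List.mem_append.mpr (Or.inl h1), h2, h3, h4, ?_, ?_⟩
            · intro u hu hut
              rcases List.mem_append.mp hu with h' | h'
              · exact h5 u h' hut
              · rw [List.mem_singleton] at h'; subst h'
                by_cases hp : 0 < c u
                · have := (hb hp).1; omega
                · omega
            · intro u hu hut heq
              rcases List.mem_append.mp hu with h' | h'
              · exact h6 u h' hut heq
              · rw [List.mem_singleton] at h'; subst h'
                have hp : 0 < c u := by omega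
                exact (hb hp).2 heq
    have := ih (K₀ ++ [k]) _ hgoal
    simpa [List.append_assoc] using this

-- counting bridge ----------------------------------------------------------
lemma pv_count_flatMap (data : List (String × String)) (T : List String) (u : String) :
    (T.flatMap (fun p => (pvPP data).getD p PySem.Set.empty)).count u
      = T.countP (fun p => decide (u ∈ (pvPP data).getD p PySem.Set.empty)) := by
  induction T with
  | nil => rfl
  | cons p T ih =>
    rw [List.flatMap_cons, List.count_append, List.countP_cons, ih]
    by_cases hm : u ∈ (pvPP data).getD p PySem.Set.empty
    · rw [List.count_eq_one_of_mem (pv_nodup_pp data p) hm, decide_eq_true hm, if_pos rfl]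
      omega
    · rw [List.count_eq_zero_of_not_mem hm, decide_eq_false hm]
      simp

lemma pv_count_eq (data : List (String × String)) (target u : String) (hu : u ≠ target) :
    ((pvPF data target).count u : Int) = pvC data target u := by
  unfold pvPF pvC
  rw [List.count_filter (by simp [hu])]
  rw [pv_count_flatMap]
  rw [List.countP_eq_length_filter]
  have hfc : (pvT data target).filter (fun p => decide (u ∈ (pvPP data).getD p PySem.Set.empty))
      = (pvT data target).filter (fun p => decide (p ∈ (pvB_build data).getD u PySem.Set.empty)) := by
    apply List.filter_congr
    intro p _
    simp only [decide_eq_decide]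
    rw [pv_mem_pp, pv_mem_build]
  rw [hfc]
  have hTnd : (pvT data target).Nodup := pv_nodup_build data target
  have hperm : ((pvT data target).filter (fun p => decide (p ∈ (pvB_build data).getD u PySem.Set.empty))).Perm
      (PySem.Set.inter ((pvB_build data).getD u PySem.Set.empty) (pvT data target)) := by
    rw [List.perm_ext_iff_of_nodup
      (List.Nodup.filter _ hTnd)
      (PySem.Set.nodup_inter _ _ (pv_nodup_build data u))]
    intro x
    rw [PySem.Set.mem_inter]
    simp only [List.mem_filter, decide_eq_true_eq]
    unfold pvT
    tauto
  rw [hperm.length_eq]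
  simp [PySem.Set.len]

lemma pv_mem_PF (data : List (String × String)) (target u : String) :
    u ∈ pvPF data target ↔ u ≠ target ∧ u ∈ (pvB_build data).keys ∧ 0 < pvC data target u := by
  unfold pvPF
  rw [List.mem_filter]
  simp only [List.mem_flatMap, Bool.not_eq_eq_eq_not, Bool.not_true, beq_eq_false_iff_ne,
    ne_eq]
  constructor
  · rintro ⟨⟨p, hpT, hup⟩, hut⟩
    have hd : (u, p) ∈ data := (pv_mem_pp data p u).mp hup
    refine ⟨hut, (pv_mem_keys data u).mpr ⟨p, hd⟩, ?_⟩
    have hpu : p ∈ (pvB_build data).getD u PySem.Set.empty := (pv_mem_build data u p).mpr hd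
    have hmem : p ∈ PySem.Set.inter ((pvB_build data).getD u PySem.Set.empty) (pvT data target) :=
      (PySem.Set.mem_inter _ _ _).mpr ⟨hpu, hpT⟩
    unfold pvC
    simp only [PySem.Set.len]
    have := List.length_pos_of_mem hmem
    omega
  · rintro ⟨hut, _, hpos⟩
    refine ⟨?_, hut⟩
    unfold pvC at hpos
    simp only [PySem.Set.len] at hpos
    have hne : PySem.Set.inter ((pvB_build data).getD u PySem.Set.empty) (pvT data target) ≠ [] := by
      intro he; rw [he] at hpos; simp at hpos
    obtain ⟨p, hp⟩ := List.exists_mem_of_ne_nil _ hne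
    rw [PySem.Set.mem_inter] at hp
    exact ⟨p, hp.2, (pv_mem_pp data p u).mpr ((pv_mem_build data u p).mp hp.1)⟩

-- results of the two loops -------------------------------------------------
lemma pvA_result (users products : List String) (data : List (String × String)) (target : String) :
    pvBestProp (pvPF data target)
      (((pvT data target).flatMap (fun p => (pvPP data).getD p PySem.Set.empty)).foldl
          (pvA_step target) (PySem.Dict.empty, 0, none)).2.1
      (similarUser users products data target) := by
  have h0 : pvInvA target [] ((PySem.Dict.empty, (0 : Int), (none : Option String))) := by
    refine ⟨?_, rfl, rfl⟩
    intro u; simp [PySem.Dict.getD_empty]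
  have h1 := pvA_fold_inv target
    ((pvT data target).flatMap (fun p => (pvPP data).getD p PySem.Set.empty)) [] _ h0
  rw [List.nil_append] at h1
  have h2 : similarUser users products data target
      = (((pvT data target).flatMap (fun p => (pvPP data).getD p PySem.Set.empty)).foldl
          (pvA_step target) (PySem.Dict.empty, 0, none)).2.2 := by
    simp only [similarUser, pvA_build_eq]
    rw [pv_foldl_foldl]
    rfl
  rw [h2]
  exact h1.2

lemma pvB_result (users products : List String) (data : List (String × String)) (target : String) :
    ∃ best, similarUser_alt users products data target = best.map (·.1) ∧
      pvInvB target (pvC data target) (pvB_build data).keys best := by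
  refine ⟨((pvB_build data).keys.foldl
      (fun best k => pvB_step target (pvT data target) best (k, (pvB_build data).getD k PySem.Set.empty)) none), ?_, ?_⟩
  · simp only [similarUser_alt]
    rw [PySem.Dict.items_eq_map_keys _ (pv_nodup_keys data) PySem.Set.empty, List.foldl_map]
    rfl
  · have h0 : pvInvB target (pvC data target) [] none := by
      intro u hu; simp at hu
    have := pvB_fold_inv target (pvC data target) (pvT data target) (pvB_build data)
      (fun k => rfl) (pvB_build data).keys [] none h0
    simpa using this

-- ===== VERDICT (by name: the statement is the Claim_ definition above) =====
theorem similarUser_spec : Claim_equal_similarUser := by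
  intro users products data target _
  unfold Spec_similarUser
  obtain ⟨best, hBeq, hBinv⟩ := pvB_result users products data target
  have hAinv := pvA_result users products data target
  rw [hBeq]
  rcases hA : similarUser users products data target with _ | a
  · rw [hA] at hAinv
    simp only [pvBestProp] at hAinv
    obtain ⟨_, hPF⟩ := hAinv
    rcases best with _ | b
    · rfl
    · exfalso
      simp only [pvInvB] at hBinv
      obtain ⟨h1, h2, h3, h4, _, _⟩ := hBinv
      have hbF : b.1 ∈ pvPF data target :=
        (pv_mem_PF data target b.1).mpr ⟨h2, h1, by omega⟩
      rw [hPF] at hbF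
      simp at hbF
  · rw [hA] at hAinv
    simp only [pvBestProp] at hAinv
    obtain ⟨haF, hamc, hamax, hamin⟩ := hAinv
    have haT : a ≠ target := ((pv_mem_PF data target a).mp haF).1
    have haK : a ∈ (pvB_build data).keys := ((pv_mem_PF data target a).mp haF).2.1
    have haC : 0 < pvC data target a := ((pv_mem_PF data target a).mp haF).2.2
    rcases best with _ | b
    · exfalso
      simp only [pvInvB] at hBinv
      have := hBinv a haK haT
      omega
    · simp only [pvInvB] at hBinv
      obtain ⟨h1, h2, h3, h4, h5, h6⟩ := hBinv
      have hbF : b.1 ∈ pvPF data target :=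
        (pv_mem_PF data target b.1).mpr ⟨h2, h1, by omega⟩
      have hca := pv_count_eq data target a haT
      have hcb := pv_count_eq data target b.1 h2
      have hab1 : (pvPF data target).count b.1 ≤ (pvPF data target).count a := hamax b.1 hbF
      have hba1 : pvC data target a ≤ b.2 := h5 a haK haT
      have heq : (pvPF data target).count a = (pvPF data target).count b.1 := by omega
      have hnab : ¬ a < b.1 := h6 a haK haT (by omega)
      have hnba : ¬ b.1 < a := hamin b.1 hbF heq.symm
      have hfin : a = b.1 := le_antisymm (not_lt.mp hnba) (not_lt.mp hnab)
      simp [hfin]
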